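-- pv_equiv track=rewrite | github.com/MoravianUniversity/intro_test_runner | src/intro_test_runner/_check_io.py | __bold
-- ===== SOURCE A (Python) =====
-- ORD_0 = ord('0')
--
-- ORD_9 = ord('9')
--
-- ORD_A = ord('A')
--
-- ORD_Z = ord('Z')
--
-- ORD_a = ord('a')
--
-- ORD_z = ord('z')
--
-- def __bold(string: str, charcode: str = "\u2060") -> str:
--     """
--     Bolds a string using unicode. Only letters and digits are supported. All
--     other characters are passed through unchanged except that all characters
--     (ones changed or not) are appended with the zero-width word joiner unicode
--     symbol \\u2060.
--     """
--     output = ''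
--     for ch in string:
--         x = ord(ch)
--         if ORD_0 <= x <= ORD_9: # numbers
--             output += chr(x+120812-ORD_0)
--         elif ORD_A <= x <= ORD_Z: # uppercase
--             output += chr(x+120276-ORD_A)
--         elif ORD_a <= x <= ORD_z: # lowercase
--             output += chr(x+120302-ORD_a)
--         else:
--             output += ch
--         output += charcode
--     return output
-- ===== SOURCE B (Python) =====
-- # Table-driven: one str.translate pass over a fixed ordinal->bold-char table,
-- # then one interleave pass appending the joiner after every character.
-- _TABLE = {}
-- for _i in range(10):
--     _TABLE[ord('0') + _i] = chr(120812 + _i)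
-- for _i in range(26):
--     _TABLE[ord('A') + _i] = chr(120276 + _i)
-- for _i in range(26):
--     _TABLE[ord('a') + _i] = chr(120302 + _i)
--
-- def __bold(string: str, charcode: str = "\u2060") -> str:
--     translated = string.translate(_TABLE)
--     return ''.join(c + charcode for c in translated)
-- ===== Notes on version B (the rewrite author's own statement) =====
-- stated objective: idiomatic
-- what changed: Replaces the per-character if/elif range dispatch with a fixed translation table applied in one str.translate pass, followed by a separate interleave pass that appends the joiner after every character.
import Mathlib
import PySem

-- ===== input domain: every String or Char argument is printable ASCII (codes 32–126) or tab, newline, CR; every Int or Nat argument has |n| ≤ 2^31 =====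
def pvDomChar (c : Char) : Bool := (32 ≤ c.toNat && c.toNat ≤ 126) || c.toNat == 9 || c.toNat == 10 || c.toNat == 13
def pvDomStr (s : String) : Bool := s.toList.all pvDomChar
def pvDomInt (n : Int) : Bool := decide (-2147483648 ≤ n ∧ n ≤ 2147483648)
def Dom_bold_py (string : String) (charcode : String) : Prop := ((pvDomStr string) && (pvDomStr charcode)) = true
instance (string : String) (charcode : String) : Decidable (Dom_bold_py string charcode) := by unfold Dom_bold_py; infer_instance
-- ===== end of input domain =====

-- B replaces A's per-character if/elif range dispatch by a fixed translation table
-- applied in one pass, then a second pass interleaving the joiner (idiomatic, same cost).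

-- ===== PORT A =====
def ORD_0 : Nat := 48   -- ord('0'); all ord values here are nonnegative, so Nat is exact
def ORD_9 : Nat := 57
def ORD_A : Nat := 65
def ORD_Z : Nat := 90
def ORD_a : Nat := 97
def ORD_z : Nat := 122

def bold_py (string : String) (charcode : String) : String :=
  String.ofList (string.toList.foldl (fun output ch =>
    let x := ch.toNat                                   -- ord(ch)
    let output :=
      if ORD_0 ≤ x ∧ x ≤ ORD_9 then output ++ [Char.ofNat (x + 120812 - ORD_0)]
      else if ORD_A ≤ x ∧ x ≤ ORD_Z then output ++ [Char.ofNat (x + 120276 - ORD_A)]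
      else if ORD_a ≤ x ∧ x ≤ ORD_z then output ++ [Char.ofNat (x + 120302 - ORD_a)]
      else output ++ [ch]
    output ++ charcode.toList) [])

-- ===== PORT B =====
-- the module-level _TABLE of Source B (ordinal -> bold character), built by the same three range loops
def boldTable : PySem.Dict Int Char :=
  let d := (PySem.List.pyRange 0 10 1).foldl
    (fun d i => d.insert (48 + i) (Char.ofNat (120812 + i).toNat)) PySem.Dict.empty
  let d := (PySem.List.pyRange 0 26 1).foldl
    (fun d i => d.insert (65 + i) (Char.ofNat (120276 + i).toNat)) d
  (PySem.List.pyRange 0 26 1).foldl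
    (fun d i => d.insert (97 + i) (Char.ofNat (120302 + i).toNat)) d

def bold_py_alt (string : String) (charcode : String) : String :=
  -- str.translate(_TABLE): per character, the mapped character if its ordinal is a key, else itself
  let translated := string.toList.map (fun c => ((boldTable.get? (c.toNat : Int)).getD c))
  -- ''.join(c + charcode for c in translated)
  String.ofList ((translated.map (fun c => c :: charcode.toList)).flatten)

-- ===== PRECONDITION & SPEC =====
def Spec_bold_py (string : String) (charcode : String) (out : String) : Prop := out = bold_py_alt string charcode
instance (string : String) (charcode : String) (out : String) : Decidable (Spec_bold_py string charcode out) := by unfold Spec_bold_py; infer_instance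

-- ===== CLAIM (what is proved, stated in full; the proofs are below) =====
def Claim_equal_bold_py : Prop := ∀ (string : String) (charcode : String), Dom_bold_py string charcode → Spec_bold_py string charcode (bold_py string charcode)

-- ===== LEMMAS AND PROOFS =====

-- one Bool check per code point: the table lookup agrees with A's range dispatch
def chk (n : Nat) : Bool :=
  ((boldTable.get? (n : Int)).getD (Char.ofNat n)) ==
      (if 48 ≤ n ∧ n ≤ 57 then Char.ofNat (n + 120812 - 48)
      else if 65 ≤ n ∧ n ≤ 90 then Char.ofNat (n + 120276 - 65)
      else if 97 ≤ n ∧ n ≤ 122 then Char.ofNat (n + 120302 - 97)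
      else Char.ofNat n)

set_option maxRecDepth 20000 in
theorem chk_all : ((List.range 127).all chk) = true := by decide

theorem tr_char (ch : Char) (h : pvDomChar ch = true) :
    (boldTable.get? ((ch.toNat : Nat) : Int)).getD ch =
      (if ORD_0 ≤ ch.toNat ∧ ch.toNat ≤ ORD_9 then Char.ofNat (ch.toNat + 120812 - ORD_0)
       else if ORD_A ≤ ch.toNat ∧ ch.toNat ≤ ORD_Z then Char.ofNat (ch.toNat + 120276 - ORD_A)
       else if ORD_a ≤ ch.toNat ∧ ch.toNat ≤ ORD_z then Char.ofNat (ch.toNat + 120302 - ORD_a)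
       else ch) := by
  have hlt : ch.toNat < 127 := by
    simp [pvDomChar] at h; omega
  have hn : chk ch.toNat = true :=
    List.all_eq_true.mp chk_all _ (List.mem_range.mpr hlt)
  rw [chk, beq_iff_eq, Char.ofNat_toNat] at hn
  simpa only [ORD_0, ORD_9, ORD_A, ORD_Z, ORD_a, ORD_z] using hn

theorem bold_loop (cc : List Char) (l : List Char) (h : ∀ ch ∈ l, pvDomChar ch = true) (acc : List Char) :
    l.foldl (fun output ch =>
      let x := ch.toNat
      let output :=
        if ORD_0 ≤ x ∧ x ≤ ORD_9 then output ++ [Char.ofNat (x + 120812 - ORD_0)]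
        else if ORD_A ≤ x ∧ x ≤ ORD_Z then output ++ [Char.ofNat (x + 120276 - ORD_A)]
        else if ORD_a ≤ x ∧ x ≤ ORD_z then output ++ [Char.ofNat (x + 120302 - ORD_a)]
        else output ++ [ch]
      output ++ cc) acc
    = acc ++ l.flatMap (fun ch => ((boldTable.get? ((ch.toNat : Nat) : Int)).getD ch) :: cc) := by
  induction l generalizing acc with
  | nil => simp
  | cons ch t ih =>
    simp only [List.foldl_cons, List.flatMap_cons]
    rw [ih (fun c hc => h c (by simp [hc]))]
    rw [tr_char ch (h ch (by simp))]
    split_ifs <;> simp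

theorem bold_py_spec' (string charcode : String) (h : Dom_bold_py string charcode) :
    bold_py string charcode = bold_py_alt string charcode := by
  unfold bold_py bold_py_alt
  have hmem : ∀ ch ∈ string.toList, pvDomChar ch = true := by
    have h2 := h
    simp [Dom_bold_py, pvDomStr, List.all_eq_true] at h2
    exact fun ch hch => h2.1 ch hch
  rw [bold_loop charcode.toList string.toList hmem []]
  simp [List.flatMap_def, List.map_map, Function.comp_def]

-- ===== VERDICT (by name: the statement is the Claim_ definition above) =====
theorem bold_py_spec : Claim_equal_bold_py := by
  intro string charcode h
  exact bold_py_spec' string charcode h
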